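-- pv_equiv track=rewrite | github.com/lemonsis/Oracle_Benchmark | platforms/encryption/easy/01248_encryption_1_final.py | blackbox
-- ===== SOURCE A (Python) =====
-- def blackbox(plaintext):
--     # Mapping for 1,2,4,8 combinations for numbers 1-26
--     # Precompute the minimal digit representation for each number 1-26
--     # Use larger numbers first, and put small number in the front
--     # Only use 1,2,4,8 as building blocks, can use each multiple times
--     # For each number, find the minimal digit representation (fewest digits, then smallest lexicographically)
--     from collections import deque
--
--     # Precompute for 1-26
--     building_blocks = [8, 4, 2, 1]
--     num_to_code = {}
--
--     for n in range(1, 27):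
--         # BFS to find minimal digit representation
--         queue = deque()
--         queue.append( ([], 0) )  # (current list of blocks, current sum)
--         visited = set()
--         found = None
--         min_len = float('inf')
--         while queue:
--             blocks, s = queue.popleft()
--             if s == n:
--                 # Compose code: sort blocks ascending, join as string
--                 code = ''.join(str(b) for b in sorted(blocks))
--                 if (found is None) or (len(code) < min_len) or (len(code) == min_len and code < found):
--                     found = code
--                     min_len = len(code)
--                 continue
--             if s > n:
--                 continue
--             for b in building_blocks:
--                 new_blocks = blocks + [b]
--                 new_sum = s + b
--                 key = (tuple(sorted(new_blocks)), new_sum)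
--                 if key in visited:
--                     continue
--                 visited.add(key)
--                 queue.append( (new_blocks, new_sum) )
--         num_to_code[n] = found
--
--     # Now, process the plaintext
--     ciphertext = ''
--     for c in plaintext:
--         if c == ' ':
--             ciphertext += '0'
--         elif c.isalpha():
--             idx = ord(c.upper()) - ord('A') + 1
--             ciphertext += num_to_code[idx]
--         # Ignore non-letter, non-space characters
--     return ciphertext
-- ===== SOURCE B (Python) =====
-- def blackbox(plaintext):
--     # Closed-form table: {1,2,4,8} is canonical, so the minimal code for n is
--     # the set bits of n % 8 (ascending: 1,2,4) followed by n // 8 copies of '8'.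
--     table = {}
--     for n in range(1, 27):
--         q, r = divmod(n, 8)
--         table[n] = ''.join(str(x) for x in (1, 2, 4) if r & x) + '8' * q
--     out = []
--     for c in plaintext:
--         if c == ' ':
--             out.append('0')
--         elif c.isalpha():
--             out.append(table[ord(c.upper()) - ord('A') + 1])
--     return ''.join(out)
-- ===== Notes on version B (the rewrite author's own statement) =====
-- stated objective: simpler
-- what changed: Replaces the per-number BFS search over block multisets with a closed-form decomposition: divmod(n, 8) plus the bits of the remainder against 1,2,4 give the minimal lexicographically-smallest code directly; output chunks are collected in a list and joined once instead of string +=.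
import Mathlib
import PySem

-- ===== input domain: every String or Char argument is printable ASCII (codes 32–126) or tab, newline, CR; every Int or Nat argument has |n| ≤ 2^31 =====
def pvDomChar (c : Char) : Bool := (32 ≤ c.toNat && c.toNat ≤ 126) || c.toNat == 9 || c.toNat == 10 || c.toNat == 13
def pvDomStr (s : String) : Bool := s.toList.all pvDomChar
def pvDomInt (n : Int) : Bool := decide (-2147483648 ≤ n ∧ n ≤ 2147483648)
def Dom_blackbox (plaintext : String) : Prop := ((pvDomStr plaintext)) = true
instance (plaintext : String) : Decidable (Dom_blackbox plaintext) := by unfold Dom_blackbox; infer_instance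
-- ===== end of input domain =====

-- B replaces A's per-number BFS over block multisets by the closed form divmod(n,8) + bit tests
-- (objective: simpler); the per-character loop collects chunks in a list and joins once.

-- ===== PORT A =====
-- Python sorted() on a list of ints (no key): equal ints are indistinguishable, so plain
-- insertion sort computes exactly the same list.
def pvInsert (x : Int) : List Int → List Int
  | [] => [x]
  | y :: ys => if x ≤ y then x :: y :: ys else y :: pvInsert x ys

def pvSort : List Int → List Int
  | [] => []
  | x :: xs => pvInsert x (pvSort xs)

-- ''.join(str(b) for b in sorted(blocks))
def pvCodeOf (blocks : List Int) : List Char :=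
  PySem.Chars.join [] ((pvSort blocks).map (fun b => PySem.Int.toChars b))

-- The BFS while-loop of A.  `fuel` only makes the loop total: one unit per popleft; the loop
-- performs at most ~1500 pops for every n ≤ 26 (the visited set is finite), so fuel 100000 is
-- never exhausted.  State mirrors Python: queue, visited, found, min_len (min_len = float('inf')
-- while found is None, which the `found.isNone ||` disjunct models exactly).
def pvBFS : Nat → Int → List (List Int × Int) → PySem.Set (List Int × Int) →
    Option (List Char) → Nat → Option (List Char)
  | 0, _, _, _, found, _ => found
  | fuel+1, n, queue, visited, found, minLen =>
    match queue with
    | [] => found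
    | (blocks, s) :: rest =>
      if s = n then
        let code := pvCodeOf blocks
        if found.isNone || decide (code.length < minLen) ||
           (decide (code.length = minLen) && decide (code < found.getD [])) then
          pvBFS fuel n rest visited (some code) code.length
        else pvBFS fuel n rest visited found minLen
      else if n < s then pvBFS fuel n rest visited found minLen
      else
        let step := ([8, 4, 2, 1] : List Int).foldl
          (fun (qv : List (List Int × Int) × PySem.Set (List Int × Int)) b =>
            let nb := blocks ++ [b]
            let ns := s + b
            let key := (pvSort nb, ns)
            if key ∈ qv.2 then qv
            else (qv.1 ++ [(nb, ns)], qv.2.add key)) (rest, visited)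
        pvBFS fuel n step.1 step.2 found minLen

-- num_to_code: found is a genuine string for every n in 1..26 (proved via the table-equality
-- theorem below), so the `.getD []` default is never taken.
def pvNumToCode : PySem.Dict Int (List Char) :=
  (PySem.List.pyRange 1 27 1).foldl
    (fun d n => d.insert n ((pvBFS 100000 n [([], 0)] (PySem.Set.ofList []) none 0).getD []))
    PySem.Dict.empty

def blackbox (plaintext : String) : String :=
  String.ofList (plaintext.toList.foldl
    (fun acc c =>
      if c = ' ' then acc ++ ['0']
      else if PySem.Chars.isalpha c then
        acc ++ pvNumToCode.getD (((PySem.Chars.upperChar c).toNat : Int) - ('A'.toNat : Int) + 1) []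
      else acc) [])

-- ===== PORT B =====
-- table[n] = ''.join(str(x) for x in (1,2,4) if r & x) + '8' * q  with q, r = divmod(n, 8)
def pvAltTable : PySem.Dict Int (List Char) :=
  (PySem.List.pyRange 1 27 1).foldl
    (fun d n =>
      let q := PySem.Int.floordiv n 8
      let r := PySem.Int.mod n 8
      d.insert n
        (PySem.Chars.join []
            ((([1, 2, 4] : List Int).filter (fun x => !(PySem.Int.band r x == 0))).map
              (fun x => PySem.Int.toChars x)) ++
          List.replicate q.toNat '8'))  -- '8' * q, exact since q ≥ 0 for n ≥ 1
    PySem.Dict.empty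

def blackbox_alt (plaintext : String) : String :=
  String.ofList (PySem.Chars.join []
    (plaintext.toList.foldl
      (fun out c =>
        if c = ' ' then out ++ [['0']]
        else if PySem.Chars.isalpha c then
          out ++ [pvAltTable.getD (((PySem.Chars.upperChar c).toNat : Int) - ('A'.toNat : Int) + 1) []]
        else out) []))

-- ===== PRECONDITION & SPEC =====
def Spec_blackbox (plaintext : String) (out : String) : Prop := out = blackbox_alt plaintext
instance (plaintext : String) (out : String) : Decidable (Spec_blackbox plaintext out) := by
  unfold Spec_blackbox; infer_instance

-- ===== CLAIM (what is proved, stated in full; the proofs are below) =====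
def Claim_equal_blackbox : Prop := ∀ (plaintext : String), Dom_blackbox plaintext → Spec_blackbox plaintext (blackbox plaintext)

-- ===== LEMMAS AND PROOFS =====

-- A state of A's search is a multiset over {1,2,4,8}; we abstract it by its count vector,
-- packed into one Nat (mixed radix 35/18/9/5), and abstract the visited set by a bitmask.

def pvCnt (bl : List Int) : Nat × Nat × Nat × Nat := (bl.count 1, bl.count 2, bl.count 4, bl.count 8)
def pvWsum (c : Nat × Nat × Nat × Nat) : Nat := c.1 + 2 * c.2.1 + 4 * c.2.2.1 + 8 * c.2.2.2
def pvPack (c : Nat × Nat × Nat × Nat) : Nat := c.1 + 35 * (c.2.1 + 18 * (c.2.2.1 + 9 * c.2.2.2))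
def pvCanon (c : Nat × Nat × Nat × Nat) : List Int :=
  List.replicate c.1 1 ++ List.replicate c.2.1 2 ++ List.replicate c.2.2.1 4 ++ List.replicate c.2.2.2 8
def pvB (c : Nat × Nat × Nat × Nat) : Prop := c.1 < 35 ∧ c.2.1 < 18 ∧ c.2.2.1 < 9 ∧ c.2.2.2 < 5
def pvGood (bl : List Int) : Prop := ∀ x ∈ bl, x = 1 ∨ x = 2 ∨ x = 4 ∨ x = 8

def pvWsumK (k : Nat) : Nat := k % 35 + 2 * (k / 35 % 18) + 4 * (k / 630 % 9) + 8 * (k / 5670)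
def pvCharCanonK (k : Nat) : List Char :=
  List.replicate (k % 35) '1' ++ List.replicate (k / 35 % 18) '2' ++
  List.replicate (k / 630 % 9) '4' ++ List.replicate (k / 5670) '8'

-- the fast abstract evaluator the simulation lemma relates A's BFS to
def pvBFS' : Nat → Int → List Nat → List Nat → Nat → Option (List Char) → Nat → Option (List Char)
  | 0, _, _, _, _, found, _ => found
  | fuel+1, n, front, back, mask, found, minLen =>
    match (if front.isEmpty then (back.reverse, ([] : List Nat)) else (front, back)) with
    | ([], _) => found
    | (k :: rest, bk) =>
      if (pvWsumK k : Int) = n then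
        let code := pvCharCanonK k
        if found.isNone || decide (code.length < minLen) ||
           (decide (code.length = minLen) && decide (code < found.getD [])) then
          pvBFS' fuel n rest bk mask (some code) code.length
        else pvBFS' fuel n rest bk mask found minLen
      else if n < (pvWsumK k : Int) then pvBFS' fuel n rest bk mask found minLen
      else
        let step := ([5670, 630, 35, 1] : List Nat).foldl
          (fun (qm : List Nat × Nat) d =>
            let kb := k + d
            if qm.2.testBit kb then qm
            else (kb :: qm.1, qm.2 ||| (1 <<< kb))) ([], mask)
        pvBFS' fuel n rest (step.1 ++ bk) step.2 found minLen

def pvDelta (b : Int) : Nat := if b = 1 then 1 else if b = 2 then 35 else if b = 4 then 630 else 5670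

def pvRel (st : List Int × Int) (k : Nat) : Prop :=
  pvGood st.1 ∧ st.2 = (pvWsum (pvCnt st.1) : Int) ∧ pvWsum (pvCnt st.1) ≤ 34 ∧ k = pvPack (pvCnt st.1)

def pvInvV (S : PySem.Set (List Int × Int)) (mask : Nat) : Prop :=
  ∀ c : Nat × Nat × Nat × Nat, pvB c →
    (((pvCanon c, (pvWsum c : Int)) ∈ S) ↔ mask.testBit (pvPack c))

-- ---- arithmetic on the packed representation ----

theorem pvB_of_wsum {c : Nat × Nat × Nat × Nat} (h : pvWsum c ≤ 34) : pvB c := by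
  obtain ⟨a, b, d, e⟩ := c; unfold pvWsum at h; unfold pvB; omega

theorem pvPack_digits {c : Nat × Nat × Nat × Nat} (h : pvB c) :
    pvPack c % 35 = c.1 ∧ pvPack c / 35 % 18 = c.2.1 ∧ pvPack c / 630 % 9 = c.2.2.1 ∧
      pvPack c / 5670 = c.2.2.2 := by
  obtain ⟨a, b, d, e⟩ := c; obtain ⟨h1, h2, h3, h4⟩ := h; unfold pvPack; omega

theorem pvWsumK_pack {c : Nat × Nat × Nat × Nat} (h : pvB c) : pvWsumK (pvPack c) = pvWsum c := by
  obtain ⟨hd1, hd2, hd3, hd4⟩ := pvPack_digits h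
  unfold pvWsumK pvWsum; rw [hd1, hd2, hd3, hd4]

theorem pvPack_inj {c c' : Nat × Nat × Nat × Nat} (h : pvB c) (h' : pvB c')
    (he : pvPack c = pvPack c') : c = c' := by
  obtain ⟨a, b, d, e⟩ := c; obtain ⟨a', b', d', e'⟩ := c'
  obtain ⟨h1, h2, h3, h4⟩ := h; obtain ⟨h1', h2', h3', h4'⟩ := h'
  unfold pvPack at he; dsimp only at he h1 h2 h3 h4 h1' h2' h3' h4'
  simp only [Prod.mk.injEq]; omega

theorem pvCanon_inj {c c' : Nat × Nat × Nat × Nat} (he : pvCanon c = pvCanon c') : c = c' := by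
  obtain ⟨a, b, d, e⟩ := c; obtain ⟨a', b', d', e'⟩ := c'
  have h1 := congrArg (List.count 1) he
  have h2 := congrArg (List.count 2) he
  have h4 := congrArg (List.count 4) he
  have h8 := congrArg (List.count 8) he
  simp [pvCanon, List.count_append, List.count_replicate] at h1 h2 h4 h8
  simp only [Prod.mk.injEq]
  exact ⟨h1, h2, h4, h8⟩

-- ---- insertion sort reaches the canonical sorted form ----

theorem pvInsert_all_le {x : Int} : ∀ {l : List Int}, (∀ y ∈ l, x ≤ y) → pvInsert x l = x :: l := by
  intro l h
  cases l with
  | nil => rfl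
  | cons y ys => simp [pvInsert, h y (by simp)]

theorem pvInsert_skip {x a : Int} (hax : a < x) :
    ∀ (k : Nat) (l : List Int), pvInsert x (List.replicate k a ++ l) = List.replicate k a ++ pvInsert x l := by
  intro k
  induction k with
  | zero => simp
  | succ m ih => intro l; simp [List.replicate_succ, pvInsert, not_le.mpr hax, ih l]

theorem pvCanon_all_ge (c : Nat × Nat × Nat × Nat) : ∀ y ∈ pvCanon c, (1:Int) ≤ y := by
  intro y hy
  simp only [pvCanon, List.mem_append, List.mem_replicate] at hy
  rcases hy with ((⟨_, h⟩ | ⟨_, h⟩) | ⟨_, h⟩) | ⟨_, h⟩ <;> omega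

theorem pvInsert_canon_1 (c : Nat × Nat × Nat × Nat) :
    pvInsert 1 (pvCanon c) = pvCanon (c.1 + 1, c.2.1, c.2.2.1, c.2.2.2) := by
  rw [pvInsert_all_le (pvCanon_all_ge c)]
  simp [pvCanon, List.replicate_succ]

theorem pvInsert_canon_2 (c : Nat × Nat × Nat × Nat) :
    pvInsert 2 (pvCanon c) = pvCanon (c.1, c.2.1 + 1, c.2.2.1, c.2.2.2) := by
  have hrest : ∀ y ∈ (List.replicate c.2.1 (2:Int) ++ List.replicate c.2.2.1 4 ++ List.replicate c.2.2.2 8), (2:Int) ≤ y := by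
    intro y hy
    simp only [List.mem_append, List.mem_replicate] at hy
    rcases hy with (⟨_, h⟩ | ⟨_, h⟩) | ⟨_, h⟩ <;> omega
  calc pvInsert 2 (pvCanon c)
      = List.replicate c.1 1 ++ pvInsert 2 (List.replicate c.2.1 2 ++ List.replicate c.2.2.1 4 ++ List.replicate c.2.2.2 8) := by
        simp only [pvCanon, List.append_assoc]
        rw [pvInsert_skip (by norm_num)]
    _ = pvCanon (c.1, c.2.1 + 1, c.2.2.1, c.2.2.2) := by
        rw [pvInsert_all_le hrest]
        simp [pvCanon, List.replicate_succ]

theorem pvInsert_canon_4 (c : Nat × Nat × Nat × Nat) :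
    pvInsert 4 (pvCanon c) = pvCanon (c.1, c.2.1, c.2.2.1 + 1, c.2.2.2) := by
  have hrest : ∀ y ∈ (List.replicate c.2.2.1 (4:Int) ++ List.replicate c.2.2.2 8), (4:Int) ≤ y := by
    intro y hy
    simp only [List.mem_append, List.mem_replicate] at hy
    rcases hy with ⟨_, h⟩ | ⟨_, h⟩ <;> omega
  calc pvInsert 4 (pvCanon c)
      = List.replicate c.1 1 ++ (List.replicate c.2.1 2 ++ pvInsert 4 (List.replicate c.2.2.1 4 ++ List.replicate c.2.2.2 8)) := by
        simp only [pvCanon, List.append_assoc]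
        rw [pvInsert_skip (by norm_num), pvInsert_skip (by norm_num)]
    _ = pvCanon (c.1, c.2.1, c.2.2.1 + 1, c.2.2.2) := by
        rw [pvInsert_all_le hrest]
        simp [pvCanon, List.replicate_succ]

theorem pvInsert_canon_8 (c : Nat × Nat × Nat × Nat) :
    pvInsert 8 (pvCanon c) = pvCanon (c.1, c.2.1, c.2.2.1, c.2.2.2 + 1) := by
  have hrest : ∀ y ∈ List.replicate c.2.2.2 (8:Int), (8:Int) ≤ y := by
    intro y hy
    rw [List.eq_of_mem_replicate hy]
  calc pvInsert 8 (pvCanon c)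
      = List.replicate c.1 1 ++ (List.replicate c.2.1 2 ++ (List.replicate c.2.2.1 4 ++ pvInsert 8 (List.replicate c.2.2.2 8))) := by
        simp only [pvCanon, List.append_assoc]
        rw [pvInsert_skip (by norm_num), pvInsert_skip (by norm_num), pvInsert_skip (by norm_num)]
    _ = pvCanon (c.1, c.2.1, c.2.2.1, c.2.2.2 + 1) := by
        rw [pvInsert_all_le hrest]
        simp [pvCanon, List.replicate_succ]

theorem pvSort_canon : ∀ (bl : List Int), pvGood bl → pvSort bl = pvCanon (pvCnt bl) := by
  intro bl
  induction bl with
  | nil => intro _; rfl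
  | cons x xs ih =>
    intro hg
    have hgx : x = 1 ∨ x = 2 ∨ x = 4 ∨ x = 8 := hg x (by simp)
    have hgs : pvGood xs := fun y hy => hg y (by simp [hy])
    have hstep : pvSort (x :: xs) = pvInsert x (pvSort xs) := rfl
    rw [hstep, ih hgs]
    rcases hgx with h | h | h | h <;> subst h
    · rw [pvInsert_canon_1]
      simp [pvCnt]
    · rw [pvInsert_canon_2]
      simp [pvCnt]
    · rw [pvInsert_canon_4]
      simp [pvCnt]
    · rw [pvInsert_canon_8]
      simp [pvCnt]

-- ---- code strings ----

theorem pvJoinNil : ∀ (L : List (List Char)), PySem.Chars.join [] L = L.flatten := by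
  intro L
  induction L with
  | nil => simp [PySem.Chars.join_nil]
  | cons p rest ih =>
    cases rest with
    | nil => simp [PySem.Chars.join_singleton]
    | cons q r => simp [PySem.Chars.join_cons_cons] at ih ⊢; simp [ih]

theorem pvCodeOf_canon {bl : List Int} (hg : pvGood bl) (hb : pvB (pvCnt bl)) :
    pvCodeOf bl = pvCharCanonK (pvPack (pvCnt bl)) := by
  obtain ⟨hd1, hd2, hd3, hd4⟩ := pvPack_digits hb
  unfold pvCodeOf pvCharCanonK
  rw [pvSort_canon bl hg, hd1, hd2, hd3, hd4, pvJoinNil]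
  have t1 : PySem.Int.toChars 1 = ['1'] := by decide
  have t2 : PySem.Int.toChars 2 = ['2'] := by decide
  have t4 : PySem.Int.toChars 4 = ['4'] := by decide
  have t8 : PySem.Int.toChars 8 = ['8'] := by decide
  simp [pvCanon, List.map_append, List.map_replicate, t1, t2, t4, t8, List.flatten_append]

-- ---- visited-set invariant ----

theorem pvInv_empty : pvInvV (PySem.Set.ofList []) 0 := by
  intro c _
  simp [Nat.zero_testBit]

theorem pvInv_add {S mask} (hI : pvInvV S mask) {c0 : Nat × Nat × Nat × Nat} (hb0 : pvB c0) :
    pvInvV (S.add (pvCanon c0, (pvWsum c0 : Int))) (mask ||| (1 <<< pvPack c0)) := by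
  intro c hb
  rw [PySem.Set.mem_add, Nat.testBit_or, hI c hb]
  have h2 : (1 <<< pvPack c0).testBit (pvPack c) = decide (pvPack c = pvPack c0) := by
    rw [Nat.shiftLeft_eq, one_mul]
    rcases eq_or_ne (pvPack c) (pvPack c0) with h | h
    · simp [h, Nat.testBit_two_pow_self]
    · simp [h, Nat.testBit_two_pow_of_ne (Ne.symm h)]
  rw [h2]
  constructor
  · rintro (h | h)
    · simp [h]
    · have : c = c0 := pvCanon_inj (by simpa using congrArg Prod.fst h)
      simp [this]
  · intro h
    rcases Bool.or_eq_true _ _ |>.mp h with h | h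
    · exact Or.inl h
    · have : c = c0 := pvPack_inj hb hb0 (by simpa using h)
      subst this; exact Or.inr rfl

-- ---- the expansion step and the main simulation ----

theorem pvGood_append {blocks : List Int} {b : Int} (hg : pvGood blocks)
    (hb : b = 1 ∨ b = 2 ∨ b = 4 ∨ b = 8) : pvGood (blocks ++ [b]) := by
  intro y hy
  rcases List.mem_append.mp hy with h | h
  · exact hg y h
  · simp at h; subst h; exact hb

theorem pvApp_facts (blocks : List Int) (b : Int) (hb : b = 1 ∨ b = 2 ∨ b = 4 ∨ b = 8) :
    pvPack (pvCnt (blocks ++ [b])) = pvPack (pvCnt blocks) + pvDelta b ∧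
      pvWsum (pvCnt (blocks ++ [b])) = pvWsum (pvCnt blocks) + b.toNat := by
  rcases hb with h | h | h | h <;> subst h <;>
    simp [pvCnt, pvPack, pvWsum, pvDelta, List.count_append] <;> exact ⟨by ring, by ring⟩

theorem pvFoldSim : ∀ (bs : List Int), (∀ b ∈ bs, b = 1 ∨ b = 2 ∨ b = 4 ∨ b = 8) →
    ∀ (blocks : List Int) (s : Int) (k : Nat), pvGood blocks →
      s = (pvWsum (pvCnt blocks) : Int) → pvWsum (pvCnt blocks) ≤ 25 → k = pvPack (pvCnt blocks) →
    ∀ (accA : List (List Int × Int)) (pref accB : List Nat) (S : PySem.Set (List Int × Int)) (mask : Nat),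
      List.Forall₂ pvRel accA (pref ++ accB.reverse) → pvInvV S mask →
      List.Forall₂ pvRel
          (bs.foldl (fun qv b =>
            let nb := blocks ++ [b]
            let ns := s + b
            let key := (pvSort nb, ns)
            if key ∈ qv.2 then qv
            else (qv.1 ++ [(nb, ns)], qv.2.add key)) (accA, S)).1
          (pref ++ ((bs.map pvDelta).foldl (fun qm d =>
            let kb := k + d
            if qm.2.testBit kb then qm
            else (kb :: qm.1, qm.2 ||| (1 <<< kb))) (accB, mask)).1.reverse) ∧
        pvInvV (bs.foldl (fun qv b =>
            let nb := blocks ++ [b]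
            let ns := s + b
            let key := (pvSort nb, ns)
            if key ∈ qv.2 then qv
            else (qv.1 ++ [(nb, ns)], qv.2.add key)) (accA, S)).2
          ((bs.map pvDelta).foldl (fun qm d =>
            let kb := k + d
            if qm.2.testBit kb then qm
            else (kb :: qm.1, qm.2 ||| (1 <<< kb))) (accB, mask)).2 := by
  intro bs
  induction bs with
  | nil =>
    intro _ blocks s k _ _ _ _ accA pref accB S mask hacc hinv
    exact ⟨hacc, hinv⟩
  | cons b bs' ih =>
    intro hbs blocks s k hg hs hw hk accA pref accB S mask hacc hinv
    have hbv : b = 1 ∨ b = 2 ∨ b = 4 ∨ b = 8 := hbs b (by simp)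
    have hbs' : ∀ x ∈ bs', x = 1 ∨ x = 2 ∨ x = 4 ∨ x = 8 := fun x hx => hbs x (by simp [hx])
    have hg' : pvGood (blocks ++ [b]) := pvGood_append hg hbv
    obtain ⟨hpk, hws⟩ := pvApp_facts blocks b hbv
    have hw34 : pvWsum (pvCnt (blocks ++ [b])) ≤ 34 := by
      rcases hbv with h | h | h | h <;> subst h <;> simp [hws] <;> omega
    have hb' : pvB (pvCnt (blocks ++ [b])) := pvB_of_wsum hw34
    have hsb : s + b = (pvWsum (pvCnt (blocks ++ [b])) : Int) := by
      rw [hws, hs]; rcases hbv with h | h | h | h <;> subst h <;> push_cast <;> ring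
    have hkey : (pvSort (blocks ++ [b]), s + b) =
        (pvCanon (pvCnt (blocks ++ [b])), (pvWsum (pvCnt (blocks ++ [b])) : Int)) := by
      rw [pvSort_canon _ hg', hsb]
    have hkd : pvPack (pvCnt (blocks ++ [b])) = k + pvDelta b := by rw [hpk, hk]
    have hmem := hinv (pvCnt (blocks ++ [b])) hb'
    rw [hkd] at hmem
    simp only [List.map, List.foldl]
    by_cases hc : mask.testBit (k + pvDelta b)
    · rw [if_pos (by rw [hkey]; exact hmem.mpr hc), if_pos hc]
      exact ih hbs' blocks s k hg hs hw hk accA pref accB S mask hacc hinv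
    · rw [if_neg (by rw [hkey]; intro hmm; exact hc (hmem.mp hmm)), if_neg hc]
      refine ih hbs' blocks s k hg hs hw hk _ pref _ _ _ ?_ ?_
      · rw [List.reverse_cons, ← List.append_assoc]
        refine List.rel_append hacc ?_
        exact List.Forall₂.cons ⟨hg', hsb, hw34, by rw [hk, hpk]⟩ List.Forall₂.nil
      · have hadd := pvInv_add hinv hb'
        rw [← hkey, hkd] at hadd
        exact hadd

theorem pvBFS'_rotate (fuel : Nat) (n : Int) (back : List Nat) (mask : Nat)
    (found : Option (List Char)) (minLen : Nat) (k : Nat) (rest : List Nat)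
    (h : back.reverse = k :: rest) :
    pvBFS' (fuel+1) n [] back mask found minLen =
      pvBFS' (fuel+1) n (k :: rest) [] mask found minLen := by
  simp only [pvBFS', List.isEmpty_nil, List.isEmpty_cons, Bool.false_eq_true, h, if_true, if_false]

theorem pvSimStep (fuel : Nat) (n : Int) (hn : n ≤ 26)
    (ih : ∀ (q : List (List Int × Int)) (front back : List Nat) (S : PySem.Set (List Int × Int))
      (mask : Nat) (found : Option (List Char)) (minLen : Nat),
      List.Forall₂ pvRel q (front ++ back.reverse) → pvInvV S mask →
      pvBFS fuel n q S found minLen = pvBFS' fuel n front back mask found minLen)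
    (blocks : List Int) (s : Int) (k : Nat) (q' : List (List Int × Int)) (rest bk : List Nat)
    (S : PySem.Set (List Int × Int)) (mask : Nat) (found : Option (List Char)) (minLen : Nat)
    (hst : pvRel (blocks, s) k) (ht : List.Forall₂ pvRel q' (rest ++ bk.reverse))
    (hI : pvInvV S mask) :
    pvBFS (fuel+1) n ((blocks, s) :: q') S found minLen =
      pvBFS' (fuel+1) n (k :: rest) bk mask found minLen := by
  obtain ⟨hg, hs, hw34, hk⟩ := hst
  dsimp only at hg hs hw34 hk
  simp only [pvBFS, pvBFS', List.isEmpty_cons, Bool.false_eq_true, if_false]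
  have hwk : (pvWsumK k : Int) = s := by
    rw [hk, pvWsumK_pack (pvB_of_wsum hw34), ← hs]
  rw [hwk]
  by_cases h1 : s = n
  · rw [if_pos h1, if_pos h1]
    have hcode : pvCharCanonK k = pvCodeOf blocks := by
      rw [hk, ← pvCodeOf_canon hg (pvB_of_wsum hw34)]
    rw [hcode]
    split_ifs with h2
    · exact ih q' rest bk S mask _ _ ht hI
    · exact ih q' rest bk S mask _ _ ht hI
  · rw [if_neg h1, if_neg h1]
    by_cases h2 : n < s
    · rw [if_pos h2, if_pos h2]
      exact ih q' rest bk S mask _ _ ht hI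
    · rw [if_neg h2, if_neg h2]
      have hw25 : pvWsum (pvCnt blocks) ≤ 25 := by
        have h1' : s ≠ n := h1
        rw [hs] at h1' h2
        omega
      have hfs := pvFoldSim [8, 4, 2, 1] (by decide) blocks s k hg hs hw25 hk
        q' (rest ++ bk.reverse) [] S mask (by simpa using ht) hI
      have hmap : (([8, 4, 2, 1] : List Int).map pvDelta) = [5670, 630, 35, 1] := rfl
      rw [hmap] at hfs
      refine ih _ rest _ _ _ _ _ ?_ hfs.2
      rw [List.reverse_append, ← List.append_assoc]
      exact hfs.1

theorem pvSim : ∀ (fuel : Nat) (n : Int), n ≤ 26 →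
    ∀ (q : List (List Int × Int)) (front back : List Nat) (S : PySem.Set (List Int × Int))
      (mask : Nat) (found : Option (List Char)) (minLen : Nat),
      List.Forall₂ pvRel q (front ++ back.reverse) → pvInvV S mask →
      pvBFS fuel n q S found minLen = pvBFS' fuel n front back mask found minLen := by
  intro fuel
  induction fuel with
  | zero => intro n _ q front back S mask found minLen _ _; rfl
  | succ fuel ih =>
    intro n hn q front back S mask found minLen hq hinv
    cases q with
    | nil =>
      have h0 : front ++ back.reverse = [] := List.forall₂_nil_left_iff.mp hq
      obtain ⟨hf, hb⟩ := List.append_eq_nil_iff.mp h0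
      have hb' : back = [] := by simpa using congrArg List.reverse hb
      subst hf hb'
      simp [pvBFS, pvBFS']
    | cons st q' =>
      obtain ⟨blocks, s⟩ := st
      rcases List.forall₂_cons_left_iff.mp hq with ⟨k, u', hst, htail, hu⟩
      cases front with
      | cons k0 f' =>
        simp only [List.cons_append, List.cons.injEq] at hu
        obtain ⟨hk0, hu'⟩ := hu
        subst hk0
        rw [← hu'] at htail
        exact pvSimStep fuel n hn (ih n hn) blocks s _ q' f' back S mask found minLen hst htail hinv
      | nil =>
        simp only [List.nil_append] at hu
        rw [pvBFS'_rotate fuel n back mask found minLen k u' hu]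
        refine pvSimStep fuel n hn (ih n hn) blocks s k q' u' [] S mask found minLen hst ?_ hinv
        simpa using htail

-- ---- the 26 table values, by evaluation of the abstract evaluator ----

set_option maxRecDepth 1000000 in
set_option maxHeartbeats 1000000000 in
theorem pvVals :
    ((PySem.List.pyRange 1 27 1).all (fun n =>
      (pvBFS' 100000 n [0] [] 0 none 0).getD [] ==
        (let q := PySem.Int.floordiv n 8
         let r := PySem.Int.mod n 8
         PySem.Chars.join []
             ((([1, 2, 4] : List Int).filter (fun x => !(PySem.Int.band r x == 0))).map
               (fun x => PySem.Int.toChars x)) ++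
           List.replicate q.toNat '8'))) = true := by
  decide

theorem pvInitRel : List.Forall₂ pvRel [(([] : List Int), (0 : Int))] ([0] ++ ([] : List Nat).reverse) := by
  refine List.Forall₂.cons ?_ List.Forall₂.nil
  refine ⟨fun y hy => absurd hy (by simp), ?_, ?_, ?_⟩ <;> simp [pvCnt, pvWsum, pvPack]

theorem pvBFSn (n : Int) (hn : n ≤ 26) :
    pvBFS 100000 n [([], 0)] (PySem.Set.ofList []) none 0 = pvBFS' 100000 n [0] [] 0 none 0 :=
  pvSim 100000 n hn _ _ _ _ _ _ _ pvInitRel pvInv_empty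

theorem pvTableEq : pvNumToCode = pvAltTable := by
  unfold pvNumToCode pvAltTable
  have h1 := PySem.List.foldl_congr_mem (PySem.List.pyRange 1 27 1)
    (fun (d : PySem.Dict Int (List Char)) n =>
      d.insert n ((pvBFS 100000 n [([], 0)] (PySem.Set.ofList []) none 0).getD []))
    (fun (d : PySem.Dict Int (List Char)) n =>
      d.insert n ((pvBFS' 100000 n [0] [] 0 none 0).getD []))
    PySem.Dict.empty
    (fun acc n hn => by
      have hb := PySem.List.mem_pyRange_one.mp hn
      dsimp only
      rw [pvBFSn n (by omega)])
  have h2 := PySem.List.foldl_congr_mem (PySem.List.pyRange 1 27 1)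
    (fun (d : PySem.Dict Int (List Char)) n =>
      d.insert n ((pvBFS' 100000 n [0] [] 0 none 0).getD []))
    (fun (d : PySem.Dict Int (List Char)) n =>
      d.insert n
        (let q := PySem.Int.floordiv n 8
         let r := PySem.Int.mod n 8
         PySem.Chars.join []
             ((([1, 2, 4] : List Int).filter (fun x => !(PySem.Int.band r x == 0))).map
               (fun x => PySem.Int.toChars x)) ++
           List.replicate q.toNat '8'))
    PySem.Dict.empty
    (fun acc n hn => by
      have hv := List.all_eq_true.mp pvVals n hn
      have he := eq_of_beq hv
      dsimp only at he ⊢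
      rw [he])
  exact h1.trans h2

-- ---- the per-character loop ----

theorem pvLoopEq : ∀ (l : List Char) (accA : List Char) (accB : List (List Char)),
    accA = PySem.Chars.join [] accB →
    l.foldl (fun acc c =>
      if c = ' ' then acc ++ ['0']
      else if PySem.Chars.isalpha c then
        acc ++ pvAltTable.getD (((PySem.Chars.upperChar c).toNat : Int) - ('A'.toNat : Int) + 1) []
      else acc) accA =
    PySem.Chars.join [] (l.foldl (fun out c =>
      if c = ' ' then out ++ [['0']]
      else if PySem.Chars.isalpha c then
        out ++ [pvAltTable.getD (((PySem.Chars.upperChar c).toNat : Int) - ('A'.toNat : Int) + 1) []]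
      else out) accB) := by
  intro l
  induction l with
  | nil => intro accA accB h; simpa using h
  | cons c rest ih =>
    intro accA accB h
    simp only [List.foldl]
    split_ifs with h1 h2
    · exact ih _ _ (by simp [pvJoinNil] at h ⊢; simp [h])
    · exact ih _ _ (by simp [pvJoinNil] at h ⊢; simp [h])
    · exact ih _ _ h

-- ===== VERDICT (by name: the statement is the Claim_ definition above) =====
theorem blackbox_spec : Claim_equal_blackbox := by
  intro p _
  unfold Spec_blackbox blackbox blackbox_alt
  rw [pvTableEq]
  rw [pvLoopEq p.toList [] [] (by simp [PySem.Chars.join_nil])]
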